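-- pv_equiv track=rewrite | github.com/awslabs/mlspace | backend/src/ml_space_lambda/utils/instances.py | abbreviated_instance_intersection
-- ===== SOURCE A (Python) =====
-- def abbreviated_instance_intersection(superset: list[str], subset: list[str]) -> list[str]:
--     # Finds the intersectinon of instances between superset and subset and returns an abbreviated list.
--     #
--     # If all instance types for a family (ie. "m4.") in superset are present in subset the resulting list
--     # will be abbreviated with a single "m4.*" value instead of individual instance types for that family.
--
--     abbreviated_instances = {}
--
--     s1_compiled = {}
--     for instance_type in superset:
--         family_name = ".".join(instance_type.split(".")[:-1])
--         family = s1_compiled.get(family_name, set())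
--         family.add(instance_type)
--         s1_compiled[family_name] = family
--
--     for instance_type in subset:
--         family_name = ".".join(instance_type.split(".")[:-1])
--         family = s1_compiled.get(family_name, set())
--
--         if instance_type in family:
--             family.remove(instance_type)
--
--             if len(family) == 0:
--                 abbreviated_instances[family_name] = set([".".join([family_name, "*"])])
--             else:
--                 family = abbreviated_instances.get(family_name, set())
--                 family.add(instance_type)
--                 abbreviated_instances[family_name] = family
--
--     return [type for family_name in abbreviated_instances for type in abbreviated_instances[family_name]]
-- ===== SOURCE B (Python) =====
-- def abbreviated_instance_intersection(superset: list[str], subset: list[str]) -> list[str]: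
--     # Group both sides by family, then compare per-family sets once, instead of
--     # destructively removing elements from the superset's sets one by one.
--     sup = {}
--     for instance_type in superset:
--         family_name = ".".join(instance_type.split(".")[:-1])
--         sup.setdefault(family_name, set()).add(instance_type)
--
--     matched = {}
--     for instance_type in subset:
--         family_name = ".".join(instance_type.split(".")[:-1])
--         if instance_type in sup.get(family_name, set()):
--             matched.setdefault(family_name, set()).add(instance_type)
--
--     result = []
--     for family_name, family in matched.items():
--         if family == sup[family_name]:
--             result.append(family_name + ".*")
--         else:
--             result.extend(family)
--     return result
-- ===== Notes on version B (the rewrite author's own statement) =====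
-- stated objective: simpler
-- what changed: Instead of destructively removing each matched instance from the superset's per-family sets and checking for emptiness, B groups both lists by family once (superset sets, then matched subset sets) and emits per family either the wildcard, when the matched set equals the superset's set, or the matched set itself.
import Mathlib
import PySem

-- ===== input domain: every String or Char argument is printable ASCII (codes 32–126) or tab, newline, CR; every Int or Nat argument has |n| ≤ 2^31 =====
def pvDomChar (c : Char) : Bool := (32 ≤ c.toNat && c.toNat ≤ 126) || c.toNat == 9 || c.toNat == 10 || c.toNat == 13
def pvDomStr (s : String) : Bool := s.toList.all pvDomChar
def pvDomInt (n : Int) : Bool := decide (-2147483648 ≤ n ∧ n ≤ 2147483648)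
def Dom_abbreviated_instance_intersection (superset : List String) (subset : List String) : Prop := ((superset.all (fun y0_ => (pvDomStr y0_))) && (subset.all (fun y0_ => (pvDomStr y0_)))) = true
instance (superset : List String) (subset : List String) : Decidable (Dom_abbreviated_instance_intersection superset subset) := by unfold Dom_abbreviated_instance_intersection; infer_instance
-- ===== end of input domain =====

-- B groups both sides by family once and compares per-family sets, instead of A's destructive
-- per-element removal from the superset's sets; equivalence of the returned list is proved (no
-- argument is mutated; the output-order claim is about the ports' deterministic set order).

-- ===== PORT A =====
-- ".".join(instance_type.split(".")[:-1])   (sep "." ≠ "", so split? is always some)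
def pvFam (instance_type : String) : String :=
  PySem.Str.join "." (PySem.List.slice ((PySem.Str.split? instance_type ".").getD []) none (some (-1)))

-- first loop of A: s1_compiled[family_name] = (s1_compiled.get(family_name, set()) with instance_type added)
def pvCompileA (superset : List String) : PySem.Dict String (PySem.Set String) :=
  superset.foldl (fun s1_compiled instance_type =>
    let family_name := pvFam instance_type
    let family := PySem.Set.add (s1_compiled.getD family_name PySem.Set.empty) instance_type
    s1_compiled.insert family_name family) PySem.Dict.empty

-- second loop of A, one step; Python mutates the set object held in s1_compiled in place
-- (family.remove), which we model by writing the shrunk set back with insert; remove is guarded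
-- by the `in` test, so discard is exact here.
def pvStepA (st : PySem.Dict String (PySem.Set String) × PySem.Dict String (PySem.Set String))
    (instance_type : String) :
    PySem.Dict String (PySem.Set String) × PySem.Dict String (PySem.Set String) :=
  let family_name := pvFam instance_type
  let family := st.1.getD family_name PySem.Set.empty
  if PySem.Set.contains family instance_type then
    let family := PySem.Set.discard family instance_type
    let s1 := st.1.insert family_name family
    if PySem.Set.len family == 0 then
      (s1, st.2.insert family_name (PySem.Set.ofList [PySem.Str.join "." [family_name, "*"]]))
    else
      (s1, st.2.insert family_name
            (PySem.Set.add (st.2.getD family_name PySem.Set.empty) instance_type))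
  else st

def abbreviated_instance_intersection (superset : List String) (subset : List String) : List String :=
  let st := subset.foldl pvStepA (pvCompileA superset, PySem.Dict.empty)
  -- [type for family_name in abbreviated_instances for type in abbreviated_instances[family_name]]
  -- (the keys come from the dict itself, so the lookup never raises; getD is exact)
  (PySem.Dict.keys st.2).flatMap (fun family_name => st.2.getD family_name PySem.Set.empty)

-- ===== PORT B =====
-- first loop of B: sup.setdefault(fam, set()).add(it)  (in-place add on the dict's set = Dict.modify)
def pvSupB (superset : List String) : PySem.Dict String (PySem.Set String) :=
  superset.foldl (fun sup instance_type =>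
    PySem.Dict.modify sup (pvFam instance_type) PySem.Set.empty
      (fun family => PySem.Set.add family instance_type)) PySem.Dict.empty

-- second loop of B, one step
def pvStepB (sup : PySem.Dict String (PySem.Set String))
    (matched : PySem.Dict String (PySem.Set String)) (instance_type : String) :
    PySem.Dict String (PySem.Set String) :=
  let family_name := pvFam instance_type
  if PySem.Set.contains (sup.getD family_name PySem.Set.empty) instance_type then
    PySem.Dict.modify matched family_name PySem.Set.empty
      (fun m => PySem.Set.add m instance_type)
  else matched

def abbreviated_instance_intersection_alt (superset : List String) (subset : List String) : List String :=
  let sup := pvSupB superset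
  let matched := subset.foldl (pvStepB sup) PySem.Dict.empty
  -- sup[family_name] never raises: a family only reaches matched via membership in sup's set
  matched.items.foldl (fun result p =>
    if PySem.Set.equal p.2 (sup.getD p.1 PySem.Set.empty) then result ++ [p.1 ++ ".*"]
    else result ++ p.2) []

-- ===== PRECONDITION & SPEC =====
def Spec_abbreviated_instance_intersection (superset : List String) (subset : List String) (out : List String) : Prop := out = abbreviated_instance_intersection_alt superset subset
instance (superset : List String) (subset : List String) (out : List String) : Decidable (Spec_abbreviated_instance_intersection superset subset out) := by unfold Spec_abbreviated_instance_intersection; infer_instance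

-- ===== CLAIM (what is proved, stated in full; the proofs are below) =====
def Claim_equal_abbreviated_instance_intersection : Prop := ∀ (superset : List String) (subset : List String), Dom_abbreviated_instance_intersection superset subset → Spec_abbreviated_instance_intersection superset subset (abbreviated_instance_intersection superset subset)

-- ===== LEMMAS AND PROOFS =====

-- the value stored in B's output for one matched family
def pvOutVal (sup : PySem.Dict String (PySem.Set String)) (k : String) (s : PySem.Set String) :
    PySem.Set String :=
  if PySem.Set.issubset (sup.getD k PySem.Set.empty) s then [k ++ ".*"] else s

-- joint invariant of the two subset loops (sup fixed): A's shrinking dict is sup minus the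
-- matched sets, A's abbreviated dict is matched transported by pvOutVal, matched sets live
-- inside sup's sets, and matched's keys are distinct.
def pvInv (sup s1 abb matched : PySem.Dict String (PySem.Set String)) : Prop :=
  s1.items = sup.items.map
      (fun p => (p.1, PySem.Set.diff p.2 (matched.getD p.1 PySem.Set.empty)))
  ∧ abb.items = matched.items.map (fun p => (p.1, pvOutVal sup p.1 p.2))
  ∧ (∀ p ∈ matched.items, ∀ x ∈ p.2, x ∈ sup.getD p.1 PySem.Set.empty)
  ∧ matched.keys.Nodup

theorem pv_wc (f : String) : PySem.Str.join "." [f, "*"] = f ++ ".*" := by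
  simp [PySem.Str.join, PySem.Chars.join, List.intercalate, List.intersperse]

theorem pv_discard_diff (s m : PySem.Set String) (x : String) :
    PySem.Set.discard (PySem.Set.diff s m) x = PySem.Set.diff s (PySem.Set.add m x) := by
  simp only [PySem.Set.discard, PySem.Set.diff, PySem.Set.add, List.filter_filter]
  by_cases hx : PySem.Set.contains m x
  · simp only [hx, if_pos]
    apply List.filter_congr
    intro y _
    by_cases hy : y = x
    · subst hy; simp_all [PySem.Set.contains]
    · simp [hy]
  · simp only [hx, Bool.false_eq_true, if_false]
    apply List.filter_congr
    intro y _
    by_cases hy : y = x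
    · subst hy; simp [PySem.Set.contains]
    · simp [PySem.Set.contains, hy]

-- get? through an items-map that keeps keys
theorem pv_get?_map (d e : PySem.Dict String (PySem.Set String))
    (g : String → PySem.Set String → PySem.Set String)
    (h : e.items = d.items.map (fun p => (p.1, g p.1 p.2))) (f : String) :
    e.get? f = (d.get? f).map (g f) := by
  simp only [PySem.Dict.get?, h, List.find?_map]
  have hcomp : ((fun p : String × PySem.Set String => p.1 == f) ∘
      (fun p : String × PySem.Set String => (p.1, g p.1 p.2))) =
      (fun p : String × PySem.Set String => p.1 == f) := rfl
  rw [hcomp]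
  cases hfind : List.find? (fun p : String × PySem.Set String => p.1 == f) d.items with
  | none => rfl
  | some p =>
    have hpf : p.1 = f := by
      have := List.find?_some hfind
      simpa using this
    simp [hpf]

theorem pv_contains_map (d e : PySem.Dict String (PySem.Set String))
    (g : String → PySem.Set String → PySem.Set String)
    (h : e.items = d.items.map (fun p => (p.1, g p.1 p.2))) (f : String) :
    e.contains f = d.contains f := by
  simp only [PySem.Dict.contains, h, List.any_map]
  rfl

-- insert commutes with an items-map that keeps keys
theorem pv_insert_map (d e : PySem.Dict String (PySem.Set String))
    (g : String → PySem.Set String → PySem.Set String)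
    (h : e.items = d.items.map (fun p => (p.1, g p.1 p.2))) (f : String) (v : PySem.Set String) :
    (e.insert f (g f v)).items = (d.insert f v).items.map (fun p => (p.1, g p.1 p.2)) := by
  simp only [PySem.Dict.insert, pv_contains_map d e g h f]
  by_cases hc : d.contains f = true
  · simp only [hc, if_pos, h, List.map_map]
    apply List.map_congr_left
    intro p _
    by_cases hp : p.1 = f
    · simp [Function.comp, hp]
    · simp [Function.comp, hp]
  · rw [if_neg hc, if_neg hc]
    simp [h]

-- in a list of pairs with distinct keys, any member is what find? by its key returns
theorem pv_find?_of_mem (l : List (String × PySem.Set String))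
    (hnd : (l.map Prod.fst).Nodup) (p : String × PySem.Set String) (hp : p ∈ l) :
    l.find? (fun q => q.1 == p.1) = some p := by
  induction l with
  | nil => simp at hp
  | cons q l ih =>
    simp only [List.map_cons, List.nodup_cons] at hnd
    rcases List.mem_cons.mp hp with hq | hmem
    · subst hq; simp
    · have hne : ¬ (q.1 == p.1) = true := by
        intro hb
        exact hnd.1 (by
          have : q.1 = p.1 := by simpa using hb
          rw [this]
          exact List.mem_map_of_mem hmem)
      simp only [List.find?_cons, hne]
      exact ih hnd.2 hmem

theorem pv_get?_of_mem (d : PySem.Dict String (PySem.Set String)) (hnd : d.keys.Nodup)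
    (p : String × PySem.Set String) (hp : p ∈ d.items) : d.get? p.1 = some p.2 := by
  simp only [PySem.Dict.get?, pv_find?_of_mem d.items hnd p hp]
  rfl

-- derived forms of the invariant's first component
theorem pv_getD_diff (sup s1 matched : PySem.Dict String (PySem.Set String))
    (h1 : s1.items = sup.items.map
      (fun p => (p.1, PySem.Set.diff p.2 (matched.getD p.1 PySem.Set.empty)))) (f : String) :
    s1.getD f PySem.Set.empty =
      PySem.Set.diff (sup.getD f PySem.Set.empty) (matched.getD f PySem.Set.empty) := by
  have h := pv_get?_map sup s1
    (fun k v => PySem.Set.diff v (matched.getD k PySem.Set.empty)) h1 f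
  simp only [PySem.Dict.getD, h]
  cases sup.get? f <;> rfl

theorem pv_contains_of_get? (d : PySem.Dict String (PySem.Set String)) (f : String)
    (v : PySem.Set String) (h : d.get? f = some v) : d.contains f = true := by
  simp only [PySem.Dict.get?, Option.map_eq_some_iff] at h
  obtain ⟨p, hp, -⟩ := h
  simp only [PySem.Dict.contains, List.any_eq_true]
  refine ⟨p, List.mem_of_find?_eq_some hp, ?_⟩
  have h2 := List.find?_some hp
  exact h2

theorem pv_mem_insert (d : PySem.Dict String (PySem.Set String)) (f : String)
    (v : PySem.Set String) (p : String × PySem.Set String)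
    (hp : p ∈ (d.insert f v).items) : p = (f, v) ∨ p ∈ d.items := by
  simp only [PySem.Dict.insert] at hp
  by_cases hc : d.contains f = true
  · simp only [hc, if_pos, List.mem_map] at hp
    obtain ⟨q, hq, hqe⟩ := hp
    by_cases hqf : (q.1 == f) = true
    · left; rw [← hqe]; simp [hqf]
    · right; rw [← hqe]; simpa [hqf] using hq
  · simp only [hc, Bool.false_eq_true, if_false, List.mem_append, List.mem_singleton] at hp
    tauto

theorem pv_keys_insert_of_contains (d : PySem.Dict String (PySem.Set String)) (f : String)
    (v : PySem.Set String) (hc : d.contains f = true) : (d.insert f v).keys = d.keys := by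
  simp only [PySem.Dict.insert, hc, if_pos, PySem.Dict.keys, List.map_map]
  apply List.map_congr_left
  intro p _
  by_cases hp : p.1 = f
  · simp [hp]
  · simp [hp]

theorem pv_keys_insert_of_not_contains (d : PySem.Dict String (PySem.Set String)) (f : String)
    (v : PySem.Set String) (hc : ¬ d.contains f = true) :
    (d.insert f v).keys = d.keys ++ [f] := by
  simp [PySem.Dict.insert, hc, PySem.Dict.keys]

theorem pv_not_contains_iff (d : PySem.Dict String (PySem.Set String)) (f : String) :
    d.contains f = true ↔ f ∈ d.keys := by
  simp only [PySem.Dict.contains, List.any_eq_true, PySem.Dict.keys, List.mem_map]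
  constructor
  · rintro ⟨p, hp, hpe⟩
    exact ⟨p, hp, by simpa using hpe⟩
  · rintro ⟨p, hp, hpe⟩
    exact ⟨p, hp, by simp [hpe]⟩

-- essentially: membership in a Set/diff
theorem pv_mem_diff (s t : PySem.Set String) (x : String) :
    x ∈ PySem.Set.diff s t ↔ x ∈ s ∧ x ∉ t := by
  simp [PySem.Set.diff, List.mem_filter, PySem.Set.contains]

theorem pv_contains_iff (s : PySem.Set String) (x : String) :
    PySem.Set.contains s x = true ↔ x ∈ s := by
  simp [PySem.Set.contains]

theorem pv_add_of_mem (s : PySem.Set String) (x : String) (h : x ∈ s) :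
    PySem.Set.add s x = s := by
  simp [PySem.Set.add, h]

theorem pv_mem_add (s : PySem.Set String) (x y : String) :
    y ∈ PySem.Set.add s x ↔ y ∈ s ∨ y = x := by
  by_cases hx : x ∈ s
  · rw [pv_add_of_mem s x hx]
    constructor
    · exact Or.inl
    · rintro (h | rfl) <;> [exact h; exact hx]
  · simp [PySem.Set.add, hx]

theorem pv_diff_eq_nil_iff (s t : PySem.Set String) :
    PySem.Set.diff s t = [] ↔ PySem.Set.issubset s t = true := by
  simp [PySem.Set.diff, List.filter_eq_nil_iff, PySem.Set.issubset, List.all_eq_true]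

theorem pv_insert_getD_self (d : PySem.Dict String (PySem.Set String)) (hnd : d.keys.Nodup)
    (f : String) (hc : d.contains f = true) :
    d.insert f (d.getD f PySem.Set.empty) = d := by
  apply PySem.Dict.ext
  simp only [PySem.Dict.insert, hc, if_pos]
  conv_rhs => rw [← List.map_id d.items]
  apply List.map_congr_left
  intro p hp
  by_cases hpf : p.1 = f
  · have hg := pv_get?_of_mem d hnd p hp
    have hv : d.getD f PySem.Set.empty = p.2 := by
      rw [← hpf, PySem.Dict.getD, hg]; rfl
    rw [hv, ← hpf]
    simp
  · simp [hpf]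

-- the one-step preservation of the joint invariant
theorem pv_step (sup : PySem.Dict String (PySem.Set String)) (hsup : sup.keys.Nodup)
    (s1 abb matched : PySem.Dict String (PySem.Set String)) (it : String)
    (hInv : pvInv sup s1 abb matched) :
    pvInv sup (pvStepA (s1, abb) it).1 (pvStepA (s1, abb) it).2 (pvStepB sup matched it) := by
  obtain ⟨h1, h2, h3, h4⟩ := hInv
  have hs1f := pv_getD_diff sup s1 matched h1 (pvFam it)
  have hBgetD : sup.getD (pvFam it) PySem.Set.empty =
      (sup.get? (pvFam it)).getD PySem.Set.empty := rfl
  by_cases hB : it ∈ sup.getD (pvFam it) PySem.Set.empty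
  · have hBc : PySem.Set.contains (sup.getD (pvFam it) PySem.Set.empty) it = true := by
      rw [pv_contains_iff]; exact hB
    by_cases hm : it ∈ matched.getD (pvFam it) PySem.Set.empty
    · -- already matched: both sides are no-ops
      have hq : matched.get? (pvFam it) =
          some (matched.getD (pvFam it) PySem.Set.empty) := by
        cases hq0 : matched.get? (pvFam it) with
        | none =>
          exfalso
          rw [PySem.Dict.getD, hq0] at hm
          simp [PySem.Set.empty] at hm
        | some v => simp [PySem.Dict.getD, hq0]
      have hA : PySem.Set.contains (s1.getD (pvFam it) PySem.Set.empty) it = false := by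
        rw [hs1f]
        simp only [← Bool.not_eq_true, pv_contains_iff, pv_mem_diff]
        tauto
      have hmod : PySem.Dict.modify matched (pvFam it) PySem.Set.empty
          (fun m => PySem.Set.add m it) = matched := by
        simp only [PySem.Dict.modify, pv_add_of_mem _ it hm]
        exact pv_insert_getD_self matched h4 _ (pv_contains_of_get? matched _ _ hq)
      simp only [pvStepA, pvStepB, hA, hBc, Bool.false_eq_true, if_false, if_true, hmod]
      exact ⟨h1, h2, h3, h4⟩
    · -- a new match
      have hA : PySem.Set.contains (s1.getD (pvFam it) PySem.Set.empty) it = true := by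
        rw [hs1f, pv_contains_iff, pv_mem_diff]; exact ⟨hB, hm⟩
      have hcsup : sup.contains (pvFam it) = true := by
        cases hq0 : sup.get? (pvFam it) with
        | none =>
          exfalso
          rw [hBgetD, hq0] at hB
          simp [PySem.Set.empty] at hB
        | some v => exact pv_contains_of_get? sup _ _ hq0
      have hfam : PySem.Set.discard (s1.getD (pvFam it) PySem.Set.empty) it =
          PySem.Set.diff (sup.getD (pvFam it) PySem.Set.empty)
            (PySem.Set.add (matched.getD (pvFam it) PySem.Set.empty) it) := by
        rw [hs1f, pv_discard_diff]
      have hmod : PySem.Dict.modify matched (pvFam it) PySem.Set.empty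
          (fun m => PySem.Set.add m it) =
          matched.insert (pvFam it)
            (PySem.Set.add (matched.getD (pvFam it) PySem.Set.empty) it) := rfl
      -- the new joint state of the matched dict
      have hM'getD_self : (matched.insert (pvFam it)
            (PySem.Set.add (matched.getD (pvFam it) PySem.Set.empty) it)).getD (pvFam it)
            PySem.Set.empty =
          PySem.Set.add (matched.getD (pvFam it) PySem.Set.empty) it := by
        simp [PySem.Dict.getD, PySem.Dict.get?_insert_self]
      have hM'getD_ne : ∀ k, k ≠ pvFam it → (matched.insert (pvFam it)
            (PySem.Set.add (matched.getD (pvFam it) PySem.Set.empty) it)).getD k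
            PySem.Set.empty = matched.getD k PySem.Set.empty := by
        intro k hk
        simp [PySem.Dict.getD, PySem.Dict.get?_insert_of_ne _ _ hk]
      have h1' : (s1.insert (pvFam it)
            (PySem.Set.diff (sup.getD (pvFam it) PySem.Set.empty)
              (PySem.Set.add (matched.getD (pvFam it) PySem.Set.empty) it))).items =
          sup.items.map (fun p => (p.1, PySem.Set.diff p.2
            ((matched.insert (pvFam it)
              (PySem.Set.add (matched.getD (pvFam it) PySem.Set.empty) it)).getD p.1
              PySem.Set.empty))) := by
        have hcs1 : s1.contains (pvFam it) = true := by
          rw [pv_contains_map sup s1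
            (fun k v => PySem.Set.diff v (matched.getD k PySem.Set.empty)) h1]
          exact hcsup
        have hli : (s1.insert (pvFam it)
              (PySem.Set.diff (sup.getD (pvFam it) PySem.Set.empty)
                (PySem.Set.add (matched.getD (pvFam it) PySem.Set.empty) it))).items =
            s1.items.map (fun p => if (p.1 == pvFam it) = true then
              ((pvFam it), PySem.Set.diff (sup.getD (pvFam it) PySem.Set.empty)
                (PySem.Set.add (matched.getD (pvFam it) PySem.Set.empty) it)) else p) := by
          simp only [PySem.Dict.insert, hcs1, if_pos]
        rw [hli, h1, List.map_map]
        apply List.map_congr_left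
        intro p hp
        by_cases hpf : p.1 = pvFam it
        · have hg := pv_get?_of_mem sup hsup p hp
          have hv : sup.getD (pvFam it) PySem.Set.empty = p.2 := by
            rw [← hpf, PySem.Dict.getD, hg]; rfl
          simp only [Function.comp_apply, hpf, hM'getD_self, beq_self_eq_true,
            if_true, hv]
        · simp only [Function.comp_apply, hM'getD_ne p.1 hpf]
          simp [hpf]
      -- value correspondence for the abbreviated dict
      have habbgetD : abb.getD (pvFam it) PySem.Set.empty =
          matched.getD (pvFam it) PySem.Set.empty := by
        have hg := pv_get?_map matched abb (pvOutVal sup) h2 (pvFam it)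
        cases hq0 : matched.get? (pvFam it) with
        | none => simp [PySem.Dict.getD, hg, hq0, PySem.Set.empty]
        | some v =>
          have hvm : matched.getD (pvFam it) PySem.Set.empty = v := by
            simp [PySem.Dict.getD, hq0]
          have hns : PySem.Set.issubset (sup.getD (pvFam it) PySem.Set.empty) v = false := by
            rw [← Bool.not_eq_true, PySem.Set.issubset_iff]
            intro hall
            exact hm (hvm ▸ hall it hB)
          have hns' : PySem.Set.issubset ((sup.get? (pvFam it)).getD PySem.Set.empty) v
              = false := hns
          simp only [PySem.Dict.getD, hg, hq0, Option.map_some, Option.getD_some, pvOutVal,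
            hns', Bool.false_eq_true, if_false]
      have h4' : (matched.insert (pvFam it)
            (PySem.Set.add (matched.getD (pvFam it) PySem.Set.empty) it)).keys.Nodup := by
        by_cases hcm : matched.contains (pvFam it) = true
        · rw [pv_keys_insert_of_contains _ _ _ hcm]; exact h4
        · rw [pv_keys_insert_of_not_contains _ _ _ hcm]
          have hnotin : pvFam it ∉ matched.keys := fun hin =>
            hcm ((pv_not_contains_iff matched (pvFam it)).mpr hin)
          exact List.Nodup.append h4 (List.nodup_singleton _)
            (List.disjoint_singleton.mpr hnotin)
      have h3' : ∀ p ∈ (matched.insert (pvFam it)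
            (PySem.Set.add (matched.getD (pvFam it) PySem.Set.empty) it)).items,
          ∀ x ∈ p.2, x ∈ sup.getD p.1 PySem.Set.empty := by
        intro p hp x hx
        rcases pv_mem_insert _ _ _ p hp with hpe | hold
        · rw [hpe] at hx ⊢
          rw [pv_mem_add] at hx
          rcases hx with hxm | rfl
          · cases hq0 : matched.get? (pvFam it) with
            | none => rw [PySem.Dict.getD, hq0] at hxm; simp [PySem.Set.empty] at hxm
            | some v =>
              have hvm : matched.getD (pvFam it) PySem.Set.empty = v := by
                simp [PySem.Dict.getD, hq0]
              rw [hvm] at hxm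
              have hmem : ((pvFam it), v) ∈ matched.items := by
                simp only [PySem.Dict.get?, Option.map_eq_some_iff] at hq0
                obtain ⟨q, hq1, hq2⟩ := hq0
                have hqf : q.1 = pvFam it := by
                  have hb := List.find?_some hq1
                  simpa using hb
                have : q = ((pvFam it), v) := by
                  cases q; simp_all
                rw [← this]; exact List.mem_of_find?_eq_some hq1
              exact h3 _ hmem x hxm
          · exact hB
        · exact h3 p hold x hx
      -- now split on whether the family is exhausted
      simp only [pvStepA, pvStepB, hA, hBc, if_true, hmod, hfam]
      by_cases hlen : PySem.Set.diff (sup.getD (pvFam it) PySem.Set.empty)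
          (PySem.Set.add (matched.getD (pvFam it) PySem.Set.empty) it) = []
      · have hz : (PySem.Set.len (PySem.Set.diff (sup.getD (pvFam it) PySem.Set.empty)
            (PySem.Set.add (matched.getD (pvFam it) PySem.Set.empty) it)) == 0) = true := by
          rw [hlen]; rfl
        have hsub := (pv_diff_eq_nil_iff _ _).mp hlen
        have hval : PySem.Set.ofList [PySem.Str.join "." [pvFam it, "*"]] =
            pvOutVal sup (pvFam it)
              (PySem.Set.add (matched.getD (pvFam it) PySem.Set.empty) it) := by
          rw [pvOutVal, if_pos hsub, pv_wc]
          rfl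
        rw [hz, if_pos rfl]
        refine ⟨h1', ?_, h3', h4'⟩
        rw [hval]
        exact pv_insert_map matched abb (pvOutVal sup) h2 (pvFam it) _
      · have hz : (PySem.Set.len (PySem.Set.diff (sup.getD (pvFam it) PySem.Set.empty)
            (PySem.Set.add (matched.getD (pvFam it) PySem.Set.empty) it)) == 0) = false := by
          rw [beq_eq_false_iff_ne]
          simp only [PySem.Set.len, ne_eq, Int.natCast_eq_zero, List.length_eq_zero_iff]
          exact hlen
        have hnsub : PySem.Set.issubset (sup.getD (pvFam it) PySem.Set.empty)
            (PySem.Set.add (matched.getD (pvFam it) PySem.Set.empty) it) = false := by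
          rw [← Bool.not_eq_true, ← pv_diff_eq_nil_iff]
          exact hlen
        have hval : PySem.Set.add (abb.getD (pvFam it) PySem.Set.empty) it =
            pvOutVal sup (pvFam it)
              (PySem.Set.add (matched.getD (pvFam it) PySem.Set.empty) it) := by
          rw [pvOutVal, if_neg (by rw [hnsub]; simp), habbgetD]
        rw [hz]
        simp only [Bool.false_eq_true, if_false]
        refine ⟨h1', ?_, h3', h4'⟩
        rw [hval]
        exact pv_insert_map matched abb (pvOutVal sup) h2 (pvFam it) _
  · -- not in the (remaining) superset family: both sides are no-ops
    have hA : PySem.Set.contains (s1.getD (pvFam it) PySem.Set.empty) it = false := by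
      rw [hs1f]
      simp only [← Bool.not_eq_true, pv_contains_iff, pv_mem_diff]
      tauto
    have hBc : PySem.Set.contains (sup.getD (pvFam it) PySem.Set.empty) it = false := by
      simp only [← Bool.not_eq_true, pv_contains_iff]
      exact hB
    simp only [pvStepA, pvStepB, hA, hBc, Bool.false_eq_true, if_false]
    exact ⟨h1, h2, h3, h4⟩

-- the two superset loops build the same dict (setdefault().add == get/add/insert)
theorem pv_compile_eq (superset : List String) : pvCompileA superset = pvSupB superset := by
  simp only [pvCompileA, pvSupB, PySem.Dict.modify]

theorem pv_sup_nodup (superset : List String) : (pvSupB superset).keys.Nodup := by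
  unfold pvSupB
  apply PySem.Dict.nodup_keys_foldl_modify_key
  simp [PySem.Dict.keys, PySem.Dict.empty]

-- invariant at the start of the subset loops
theorem pv_init (superset : List String) :
    pvInv (pvSupB superset) (pvSupB superset) PySem.Dict.empty PySem.Dict.empty := by
  refine ⟨?_, rfl, ?_, ?_⟩
  · conv_lhs => rw [← List.map_id (pvSupB superset).items]
    apply List.map_congr_left
    intro p _
    simp [PySem.Set.diff, PySem.Set.empty, PySem.Set.contains]
  · intro p hp
    simp [PySem.Dict.empty] at hp
  · simp [PySem.Dict.keys, PySem.Dict.empty]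

theorem pv_loop (sup : PySem.Dict String (PySem.Set String)) (hsup : sup.keys.Nodup) :
    ∀ (l : List String) (s1 abb matched : PySem.Dict String (PySem.Set String)),
      pvInv sup s1 abb matched →
      pvInv sup (l.foldl pvStepA (s1, abb)).1 (l.foldl pvStepA (s1, abb)).2
        (l.foldl (pvStepB sup) matched) := by
  intro l
  induction l with
  | nil => intro s1 abb matched h; exact h
  | cons x xs ih =>
    intro s1 abb matched h
    have hstep := pv_step sup hsup s1 abb matched x h
    have hrec := ih (pvStepA (s1, abb) x).1 (pvStepA (s1, abb) x).2 (pvStepB sup matched x) hstep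
    simpa using hrec

-- reading the final states back out as the two return expressions
theorem pv_final (sup matched abb : PySem.Dict String (PySem.Set String))
    (h2 : abb.items = matched.items.map (fun p => (p.1, pvOutVal sup p.1 p.2)))
    (h3 : ∀ p ∈ matched.items, ∀ x ∈ p.2, x ∈ sup.getD p.1 PySem.Set.empty)
    (h4 : matched.keys.Nodup) :
    abb.keys.flatMap (fun family_name => abb.getD family_name PySem.Set.empty) =
      matched.items.foldl (fun result p =>
        if PySem.Set.equal p.2 (sup.getD p.1 PySem.Set.empty) then result ++ [p.1 ++ ".*"]
        else result ++ p.2) [] := by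
  have hkeys : abb.keys = matched.keys := by
    simp only [PySem.Dict.keys, h2, List.map_map]
    rfl
  have habbnd : abb.keys.Nodup := hkeys ▸ h4
  have hitems := PySem.Dict.items_eq_map_keys abb habbnd PySem.Set.empty
  have hL : abb.keys.flatMap (fun family_name => abb.getD family_name PySem.Set.empty) =
      abb.items.flatMap (fun p => p.2) := by
    rw [hitems, List.flatMap_map]
  have hfun : (fun (result : List String) (p : String × PySem.Set String) =>
        if PySem.Set.equal p.2 (sup.getD p.1 PySem.Set.empty) then result ++ [p.1 ++ ".*"]
        else result ++ p.2) =
      (fun result p => result ++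
        (if PySem.Set.equal p.2 (sup.getD p.1 PySem.Set.empty) then [p.1 ++ ".*"] else p.2)) := by
    funext result p
    split <;> rfl
  rw [hL, hfun, PySem.List.foldl_append_eq_flatMap, List.nil_append, h2, List.flatMap_map]
  rw [List.flatMap_def, List.flatMap_def]
  apply congrArg
  apply List.map_congr_left
  intro p hp
  have hsub : PySem.Set.issubset p.2 (sup.getD p.1 PySem.Set.empty) = true := by
    rw [PySem.Set.issubset_iff]
    exact h3 p hp
  simp only [pvOutVal, PySem.Set.equal, hsub, Bool.true_and]

-- ===== VERDICT (by name: the statement is the Claim_ definition above) =====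
theorem abbreviated_instance_intersection_spec : Claim_equal_abbreviated_instance_intersection := by
  intro superset subset _
  unfold Spec_abbreviated_instance_intersection
  simp only [abbreviated_instance_intersection, abbreviated_instance_intersection_alt]
  rw [pv_compile_eq]
  obtain ⟨h1, h2, h3, h4⟩ := pv_loop (pvSupB superset) (pv_sup_nodup superset) subset
    (pvSupB superset) PySem.Dict.empty PySem.Dict.empty (pv_init superset)
  exact pv_final (pvSupB superset) _ _ h2 h3 h4
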